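-- pv_equiv track=rewrite | github.com/amna011/modelCompression_OCR_TinyML | src/ocr/data.py | _min_ctc_steps
-- ===== SOURCE A (Python) =====
-- def _min_ctc_steps(text: str) -> int:
--     if not text:
--         return 0
--     steps = len(text)
--     for i in range(1, len(text)):
--         if text[i] == text[i - 1]:
--             steps += 1
--     return steps
-- ===== SOURCE B (Python) =====
-- def _min_ctc_steps(text: str) -> int:
--     # Divide and conquer: steps(uv) = steps(u) + steps(v) + (1 if u[-1] == v[0] else 0),
--     # and a single character needs exactly 1 step.
--     def go(lo: int, hi: int) -> int:
--         if hi - lo == 1: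
--             return 1
--         mid = (lo + hi) // 2
--         join = 1 if text[mid - 1] == text[mid] else 0
--         return go(lo, mid) + go(mid, hi) + join
--     return 0 if not text else go(0, len(text))
-- ===== Notes on version B (the rewrite author's own statement) =====
-- stated objective: alternative
-- what changed: B replaces A's single left-to-right scan counting equal adjacent pairs by a divide-and-conquer recursion on index halves, using steps(uv) = steps(u) + steps(v) + (1 if u[-1]==v[0] else 0) with steps(single char) = 1.
import Mathlib
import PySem

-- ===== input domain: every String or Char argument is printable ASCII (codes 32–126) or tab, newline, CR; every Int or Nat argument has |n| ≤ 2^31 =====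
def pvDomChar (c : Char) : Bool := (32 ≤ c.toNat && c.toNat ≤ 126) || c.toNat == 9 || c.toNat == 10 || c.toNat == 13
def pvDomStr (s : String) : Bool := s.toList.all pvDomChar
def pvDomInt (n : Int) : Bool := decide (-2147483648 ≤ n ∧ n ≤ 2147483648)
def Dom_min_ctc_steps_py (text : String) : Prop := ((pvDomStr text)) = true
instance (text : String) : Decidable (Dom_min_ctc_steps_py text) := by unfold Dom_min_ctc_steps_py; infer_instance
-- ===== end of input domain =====

-- B replaces A's linear scan by a divide-and-conquer recursion on index halves
-- (steps(uv) = steps(u) + steps(v) + junction correction); objective: alternative algorithm.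


-- ===== PORT A =====
def min_ctc_steps_py (text : String) : Int :=
  if text.toList = [] then 0
  else
    (PySem.List.pyRange 1 (PySem.Str.len text) 1).foldl
      (fun steps i =>
        if PySem.List.pyGetD text.toList i ' ' = PySem.List.pyGetD text.toList (i - 1) ' '
        then steps + 1 else steps)
      (PySem.Str.len text)

-- ===== PORT B =====
-- go(lo, hi): steps for text[lo:hi].  The fuel argument (= hi - lo at the top call) and the
-- '≤ 1' guard (Python checks '== 1') only make the recursion total/structural; B only ever
-- calls go with lo < hi and enough fuel, where they change nothing.
def pvGo (l : List Char) : Nat → Int → Int → Int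
  | 0, _, _ => 1
  | fuel + 1, lo, hi =>
    if hi - lo ≤ 1 then 1
    else
      let mid := PySem.Int.floordiv (lo + hi) 2
      let join : Int :=
        if PySem.List.pyGetD l (mid - 1) ' ' = PySem.List.pyGetD l mid ' ' then 1 else 0
      pvGo l fuel lo mid + pvGo l fuel mid hi + join

def min_ctc_steps_py_alt (text : String) : Int :=
  if text.toList = [] then 0
  else pvGo text.toList (PySem.Str.len text).toNat 0 (PySem.Str.len text)

-- ===== PRECONDITION & SPEC =====
def Spec_min_ctc_steps_py (text : String) (out : Int) : Prop := out = min_ctc_steps_py_alt text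
instance (text : String) (out : Int) : Decidable (Spec_min_ctc_steps_py text out) := by unfold Spec_min_ctc_steps_py; infer_instance

-- ===== CLAIM (what is proved, stated in full; the proofs are below) =====
def Claim_equal_min_ctc_steps_py : Prop := ∀ (text : String), Dom_min_ctc_steps_py text → Spec_min_ctc_steps_py text (min_ctc_steps_py text)

-- ===== LEMMAS AND PROOFS =====

-- the 0/1 weight of position i: does l[i] repeat l[i-1]?
def pvG (l : List Char) (i : Int) : Int :=
  if PySem.List.pyGetD l i ' ' = PySem.List.pyGetD l (i - 1) ' ' then 1 else 0

lemma pvGo_eq_sum (l : List Char) :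
    ∀ n : Nat, ∀ lo hi : Int, (hi - lo).toNat ≤ n → lo < hi →
      pvGo l n lo hi = (hi - lo) + ((PySem.List.pyRange (lo + 1) hi 1).map (pvG l)).sum := by
  intro n
  induction n with
  | zero => intro lo hi hn hlt; omega
  | succ n ih =>
    intro lo hi hn hlt
    rw [pvGo]
    by_cases h1 : hi - lo ≤ 1
    · have he : hi = lo + 1 := by omega
      rw [if_pos h1, he, PySem.List.pyRange_one_eq_nil (by omega)]
      simp
    · rw [if_neg h1]
      show pvGo l n lo (PySem.Int.floordiv (lo + hi) 2) +
          pvGo l n (PySem.Int.floordiv (lo + hi) 2) hi +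
          (if PySem.List.pyGetD l (PySem.Int.floordiv (lo + hi) 2 - 1) ' '
              = PySem.List.pyGetD l (PySem.Int.floordiv (lo + hi) 2) ' '
           then (1:Int) else 0) = _
      have hmid : PySem.Int.floordiv (lo + hi) 2 = (lo + hi) / 2 :=
        PySem.Int.floordiv_eq_ediv_of_pos (by norm_num)
      set mid := PySem.Int.floordiv (lo + hi) 2 with hm
      have hb1 : lo + 1 ≤ mid := by omega
      have hb2 : mid ≤ hi - 1 := by omega
      rw [ih lo mid (by omega) (by omega), ih mid hi (by omega) (by omega)]
      rw [PySem.List.pyRange_one_append (lo + 1) mid hi (by omega) (by omega),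
          PySem.List.pyRange_one_cons (show mid < hi by omega)]
      simp only [List.map_append, List.sum_append, List.map_cons, List.sum_cons]
      have hj : (if PySem.List.pyGetD l (mid - 1) ' ' = PySem.List.pyGetD l mid ' '
            then (1:Int) else 0) = pvG l mid := by
        unfold pvG
        by_cases hc : PySem.List.pyGetD l mid ' ' = PySem.List.pyGetD l (mid - 1) ' '
        · rw [if_pos hc, if_pos hc.symm]
        · rw [if_neg hc, if_neg (fun he => hc he.symm)]
      rw [hj]
      ring

lemma pvFold_eq_sum (l : List Char) (a b init : Int) :
    (PySem.List.pyRange a b 1).foldl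
      (fun steps i =>
        if PySem.List.pyGetD l i ' ' = PySem.List.pyGetD l (i - 1) ' '
        then steps + 1 else steps) init
    = init + ((PySem.List.pyRange a b 1).map (pvG l)).sum := by
  have hf : (fun (steps : Int) (i : Int) =>
        if PySem.List.pyGetD l i ' ' = PySem.List.pyGetD l (i - 1) ' '
        then steps + 1 else steps)
      = (fun (steps : Int) (i : Int) => steps + pvG l i) := by
    funext steps i
    unfold pvG
    split_ifs <;> omega
  rw [hf, PySem.List.foldl_add]

-- ===== VERDICT (by name: the statement is the Claim_ definition above) =====
theorem min_ctc_steps_py_spec : Claim_equal_min_ctc_steps_py := by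
  intro text _
  unfold Spec_min_ctc_steps_py min_ctc_steps_py min_ctc_steps_py_alt
  by_cases h : text.toList = []
  · rw [if_pos h, if_pos h]
  · rw [if_neg h, if_neg h]
    have hlen : (0:Int) < PySem.Str.len text := by
      simp only [PySem.Str.len_eq]
      exact_mod_cast List.length_pos_iff.mpr h
    rw [pvFold_eq_sum,
        pvGo_eq_sum text.toList (PySem.Str.len text).toNat 0 (PySem.Str.len text)
          (by omega) hlen]
    simp only [zero_add]
    omega
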